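-- pv_equiv track=rewrite | github.com/donghojeon/passstudy | 3.statistics/complexity_analysis.py | count_chars_bit
-- ===== SOURCE A (Python) =====
-- def count_chars_bit(password):
--     """비밀번호의 문자 유형을 비트마스크로 계산하여 복잡도 레벨을 반환합니다."""
--     upper, lower, number, special = 0, 0, 0, 0
--
--     for char in password:
--         if 'A' <= char <= 'Z':
--             upper = 0b100
--         elif 'a' <= char <= 'z':
--             lower = 0b1
--         elif '0' <= char <= '9':
--             number = 0b10
--         else:
--             special = 0b1000
--
--     # 비트마스크 합산 결과 반환
--     return upper + lower + number + special
-- ===== SOURCE B (Python) =====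
-- def count_chars_bit(password):
--     """비밀번호의 문자 유형을 비트마스크로 계산하여 복잡도 레벨을 반환합니다."""
--     upper = 0b100 if any('A' <= c <= 'Z' for c in password) else 0
--     lower = 0b1 if any('a' <= c <= 'z' for c in password) else 0
--     number = 0b10 if any('0' <= c <= '9' for c in password) else 0
--     special = 0b1000 if any(not ('A' <= c <= 'Z' or 'a' <= c <= 'z' or '0' <= c <= '9') for c in password) else 0
--     return upper + lower + number + special
-- ===== Notes on version B (the rewrite author's own statement) =====
-- stated objective: idiomatic
-- what changed: Replaces the single stateful loop with an elif chain by four independent any() membership scans, one per character class, summed.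
import Mathlib
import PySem

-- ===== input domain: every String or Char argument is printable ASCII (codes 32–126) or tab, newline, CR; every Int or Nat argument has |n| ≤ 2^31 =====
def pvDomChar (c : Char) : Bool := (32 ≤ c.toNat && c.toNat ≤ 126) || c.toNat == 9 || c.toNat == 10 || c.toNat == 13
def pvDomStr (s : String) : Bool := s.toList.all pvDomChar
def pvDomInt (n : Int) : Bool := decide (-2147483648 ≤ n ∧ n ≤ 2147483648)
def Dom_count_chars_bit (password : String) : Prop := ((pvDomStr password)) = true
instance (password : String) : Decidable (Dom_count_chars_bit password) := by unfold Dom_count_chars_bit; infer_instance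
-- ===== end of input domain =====

-- B replaces A's single accumulating loop by four independent any-scans (one per class), summed; idiomatic rewrite.


-- ===== PORT A =====
-- literal port of A: one fold over the characters carrying (upper, lower, number, special)
def count_chars_bit (password : String) : Int :=
  let st := password.toList.foldl
    (fun (st : Int × Int × Int × Int) c =>
      if 'A' ≤ c ∧ c ≤ 'Z' then (4, st.2.1, st.2.2.1, st.2.2.2)
      else if 'a' ≤ c ∧ c ≤ 'z' then (st.1, 1, st.2.2.1, st.2.2.2)
      else if '0' ≤ c ∧ c ≤ '9' then (st.1, st.2.1, 2, st.2.2.2)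
      else (st.1, st.2.1, st.2.2.1, 8))
    (0, 0, 0, 0)
  st.1 + st.2.1 + st.2.2.1 + st.2.2.2

-- ===== PORT B =====
-- literal port of B: four independent any-scans, summed
def count_chars_bit_alt (password : String) : Int :=
  (if password.toList.any (fun c => decide ('A' ≤ c ∧ c ≤ 'Z')) then 4 else 0)
  + (if password.toList.any (fun c => decide ('a' ≤ c ∧ c ≤ 'z')) then 1 else 0)
  + (if password.toList.any (fun c => decide ('0' ≤ c ∧ c ≤ '9')) then 2 else 0)
  + (if password.toList.any
        (fun c => !decide (('A' ≤ c ∧ c ≤ 'Z') ∨ ('a' ≤ c ∧ c ≤ 'z') ∨ ('0' ≤ c ∧ c ≤ '9'))) then 8 else 0)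

-- ===== PRECONDITION & SPEC =====
def Spec_count_chars_bit (password : String) (out : Int) : Prop := out = count_chars_bit_alt password
instance (password : String) (out : Int) : Decidable (Spec_count_chars_bit password out) := by unfold Spec_count_chars_bit; infer_instance

-- ===== CLAIM (what is proved, stated in full; the proofs are below) =====
def Claim_equal_count_chars_bit : Prop := ∀ (password : String), Dom_count_chars_bit password → Spec_count_chars_bit password (count_chars_bit password)

-- ===== LEMMAS AND PROOFS =====


-- disjointness of the three explicit ranges (Char order facts)
theorem pv_up_not_low {c : Char} (h : 'A' ≤ c ∧ c ≤ 'Z') : ¬('a' ≤ c ∧ c ≤ 'z') :=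
  fun h2 => absurd (h2.1.trans h.2) (by decide)
theorem pv_up_not_dig {c : Char} (h : 'A' ≤ c ∧ c ≤ 'Z') : ¬('0' ≤ c ∧ c ≤ '9') :=
  fun h2 => absurd (h.1.trans h2.2) (by decide)
theorem pv_low_not_dig {c : Char} (h : 'a' ≤ c ∧ c ≤ 'z') : ¬('0' ≤ c ∧ c ≤ '9') :=
  fun h2 => absurd (h.1.trans h2.2) (by decide)

-- the fold's components: each is set to its constant iff the class occurs, otherwise keeps the accumulator
theorem pv_fold_char (l : List Char) (u lo n sp : Int) :
    l.foldl
      (fun (st : Int × Int × Int × Int) c =>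
        if 'A' ≤ c ∧ c ≤ 'Z' then (4, st.2.1, st.2.2.1, st.2.2.2)
        else if 'a' ≤ c ∧ c ≤ 'z' then (st.1, 1, st.2.2.1, st.2.2.2)
        else if '0' ≤ c ∧ c ≤ '9' then (st.1, st.2.1, 2, st.2.2.2)
        else (st.1, st.2.1, st.2.2.1, 8))
      (u, lo, n, sp)
    = ((if l.any (fun c => decide ('A' ≤ c ∧ c ≤ 'Z')) then 4 else u),
       (if l.any (fun c => decide ('a' ≤ c ∧ c ≤ 'z')) then 1 else lo),
       (if l.any (fun c => decide ('0' ≤ c ∧ c ≤ '9')) then 2 else n),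
       (if l.any (fun c => !decide (('A' ≤ c ∧ c ≤ 'Z') ∨ ('a' ≤ c ∧ c ≤ 'z') ∨ ('0' ≤ c ∧ c ≤ '9'))) then 8 else sp)) := by
  induction l generalizing u lo n sp with
  | nil => simp
  | cons c t ih =>
    by_cases hU : 'A' ≤ c ∧ c ≤ 'Z'
    · simp [hU, pv_up_not_low hU, pv_up_not_dig hU, ih]
    · by_cases hL : 'a' ≤ c ∧ c ≤ 'z'
      · simp [hU, hL, pv_low_not_dig hL, ih]
      · by_cases hN : '0' ≤ c ∧ c ≤ '9'
        · simp [hU, hL, hN, ih]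
        · simp [hU, hL, hN, ih]

-- ===== VERDICT (by name: the statement is the Claim_ definition above) =====
theorem count_chars_bit_spec : Claim_equal_count_chars_bit := by
  intro password _
  unfold Spec_count_chars_bit count_chars_bit count_chars_bit_alt
  rw [pv_fold_char]
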